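-- pv_equiv track=rewrite | github.com/Pella86/PellaScreamBot | UnicodeFonts.py | fraktur
-- ===== SOURCE A (Python) =====
-- import string
--
-- def fraktur(text):
--     start = 0x1D56C
--     #end = 0x1D537
--
--     capitals = string.ascii_uppercase
--     lowers = string.ascii_lowercase
--
--     alphabet = capitals + lowers
--
--     ascii_to_fraktur = {}
--
--     for l in alphabet:
--         ascii_to_fraktur[l] = chr(start)
--         start += 1
--
--     s = ""
--     for l in text:
--         try:
--             s += ascii_to_fraktur[l]
--         except KeyError:
--             s += l
--
--     return s
-- ===== SOURCE B (Python) =====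
-- def fraktur(text):
--     for i in range(26):
--         text = text.replace(chr(65 + i), chr(0x1D56C + i))
--         text = text.replace(chr(97 + i), chr(0x1D586 + i))
--     return text
-- ===== Notes on version B (the rewrite author's own statement) =====
-- stated objective: alternative
-- what changed: Replaces A's sequentially-filled 52-entry dict and per-character try/except concatenation loop by 26 staged whole-string passes, each doing two single-character str.replace substitutions (A->0x1D56C+i, a->0x1D586+i); correct because the fraktur outputs are non-ASCII so later passes never touch earlier replacements.
import Mathlib
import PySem

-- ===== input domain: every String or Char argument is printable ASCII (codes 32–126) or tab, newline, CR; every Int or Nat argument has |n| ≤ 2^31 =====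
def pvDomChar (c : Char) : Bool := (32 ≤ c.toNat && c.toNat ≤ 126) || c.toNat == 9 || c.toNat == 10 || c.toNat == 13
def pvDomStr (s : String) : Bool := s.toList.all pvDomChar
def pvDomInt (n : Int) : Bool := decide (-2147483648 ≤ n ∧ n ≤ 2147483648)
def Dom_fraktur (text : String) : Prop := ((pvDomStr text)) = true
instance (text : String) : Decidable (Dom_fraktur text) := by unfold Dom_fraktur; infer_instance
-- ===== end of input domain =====

-- B replaces A's dict-driven single pass by 26 staged whole-string substitution passes
-- (one str.replace per letter of each case), a different traversal of the data (alternative).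

-- ===== PORT A =====
-- the dict A fills by walking the alphabet with a running codepoint counter
def frakturDict : PySem.Dict Char Char :=
  (("ABCDEFGHIJKLMNOPQRSTUVWXYZ" ++ "abcdefghijklmnopqrstuvwxyz").toList.foldl
    (fun (p : PySem.Dict Char Char × Nat) l => (p.1.insert l (Char.ofNat p.2), p.2 + 1))
    (PySem.Dict.empty, 0x1D56C)).1

def fraktur (text : String) : String :=
  String.ofList (text.toList.foldl
    (fun s l => s ++ [match frakturDict.get? l with | some v => v | none => l]) [])

-- ===== PORT B =====
-- Source B: for i in range(26): text = text.replace(chr(65+i), chr(0x1D56C+i)); text = text.replace(chr(97+i), chr(0x1D586+i))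
def fraktur_alt (text : String) : String :=
  (PySem.List.pyRange 0 26 1).foldl
    (fun t i =>
      PySem.Str.replace
        (PySem.Str.replace t (String.ofList [Char.ofNat (65 + i.toNat)]) (String.ofList [Char.ofNat (0x1D56C + i.toNat)]))
        (String.ofList [Char.ofNat (97 + i.toNat)]) (String.ofList [Char.ofNat (0x1D586 + i.toNat)]))
    text

-- ===== PRECONDITION & SPEC =====
def Spec_fraktur (text : String) (out : String) : Prop := out = fraktur_alt text
instance (text : String) (out : String) : Decidable (Spec_fraktur text out) := by unfold Spec_fraktur; infer_instance

-- ===== CLAIM (what is proved, stated in full; the proofs are below) =====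
def Claim_equal_fraktur : Prop := ∀ (text : String), Dom_fraktur text → Spec_fraktur text (fraktur text)

-- ===== LEMMAS AND PROOFS =====
set_option maxRecDepth 100000

-- A's per-character translation (dict lookup with pass-through on KeyError)
def frakturLook (l : Char) : Char :=
  match frakturDict.get? l with | some v => v | none => l

-- single-character substitution: what one-char str.replace does per character
def subst1 (a b c : Char) : Char := if a == c then b else c

-- B's per-character translation: the effect of all 52 staged passes on one character
def frakturPasses (c : Char) : Char :=
  (PySem.List.pyRange 0 26 1).foldl
    (fun x i => subst1 (Char.ofNat (97 + i.toNat)) (Char.ofNat (0x1D586 + i.toNat))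
                  (subst1 (Char.ofNat (65 + i.toNat)) (Char.ofNat (0x1D56C + i.toNat)) x)) c

theorem replace_go_single (a b : Char) :
    ∀ (fuel : Nat) (l acc : List Char), l.length ≤ fuel →
      PySem.Chars.replace.go [a] [b] fuel l acc = acc.reverse ++ l.map (subst1 a b) := by
  intro fuel
  induction fuel with
  | zero =>
    intro l acc h
    have : l = [] := List.eq_nil_of_length_eq_zero (Nat.le_zero.mp h)
    subst this
    simp [PySem.Chars.replace.go]
  | succ n ih =>
    intro l acc h
    cases l with
    | nil => simp [PySem.Chars.replace.go]
    | cons c t =>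
      simp only [PySem.Chars.replace.go, List.isPrefixOf, Bool.and_true]
      by_cases hc : (a == c) = true
      · rw [if_pos hc,
            ih (List.drop [a].length (c :: t)) ([b].reverse ++ acc)
              (by simp at h ⊢; omega)]
        simp [subst1, hc]
      · rw [if_neg hc, ih t (c :: acc) (by simp at h ⊢; omega)]
        simp [subst1, hc]

theorem replace_single (a b : Char) (l : List Char) :
    PySem.Chars.replace l [a] [b] = l.map (subst1 a b) := by
  rw [PySem.Chars.replace]
  simp only [List.isEmpty_cons, Bool.false_eq_true, if_false]
  exact replace_go_single a b l.length l [] le_rfl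

theorem foldl_map_comp (g : Int → Char → Char) :
    ∀ (is : List Int) (l : List Char),
      is.foldl (fun t i => t.map (g i)) l = l.map (fun c => is.foldl (fun x i => g i x) c) := by
  intro is
  induction is with
  | nil => intro l; simp
  | cons i is ih => intro l; simp [List.foldl_cons, ih, List.map_map, Function.comp]

theorem fraktur_alt_toList (text : String) :
    (fraktur_alt text).toList = text.toList.map frakturPasses := by
  unfold fraktur_alt frakturPasses
  have key : ∀ (is : List Int) (t : String),
      (is.foldl
        (fun t i =>
          PySem.Str.replace
            (PySem.Str.replace t (String.ofList [Char.ofNat (65 + i.toNat)]) (String.ofList [Char.ofNat (0x1D56C + i.toNat)]))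
            (String.ofList [Char.ofNat (97 + i.toNat)]) (String.ofList [Char.ofNat (0x1D586 + i.toNat)])) t).toList
      = is.foldl
          (fun l i => l.map (fun c => subst1 (Char.ofNat (97 + i.toNat)) (Char.ofNat (0x1D586 + i.toNat))
                      (subst1 (Char.ofNat (65 + i.toNat)) (Char.ofNat (0x1D56C + i.toNat)) c))) t.toList := by
    intro is
    induction is with
    | nil => intro t; rfl
    | cons i is ih =>
      intro t
      simp only [List.foldl_cons, ih, PySem.Str.toList_replace, String.toList_ofList]
      congr 1
      rw [replace_single, replace_single, List.map_map]
      rfl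
  rw [key]
  rw [foldl_map_comp (fun i c => subst1 (Char.ofNat (97 + i.toNat)) (Char.ofNat (0x1D586 + i.toNat))
        (subst1 (Char.ofNat (65 + i.toNat)) (Char.ofNat (0x1D56C + i.toNat)) c))]

theorem passes_eq_look (c : Char) (h : pvDomChar c = true) : frakturPasses c = frakturLook c := by
  have hlt : c.toNat < 127 := by
    simp [pvDomChar] at h
    omega
  have key : ∀ n, n < 127 → frakturPasses (Char.ofNat n) = frakturLook (Char.ofNat n) := by decide
  have := key c.toNat hlt
  rwa [Char.ofNat_toNat] at this

-- ===== VERDICT (by name: the statement is the Claim_ definition above) =====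
theorem fraktur_spec : Claim_equal_fraktur := by
  intro text hdom
  unfold Spec_fraktur fraktur
  rw [show (fun (s : List Char) l => s ++ [match frakturDict.get? l with | some v => v | none => l])
        = (fun s l => s ++ [frakturLook l]) from rfl,
      PySem.List.foldl_append_singleton_eq_map]
  simp only [List.nil_append]
  have : (fraktur_alt text).toList = text.toList.map frakturLook := by
    rw [fraktur_alt_toList]
    apply List.map_congr_left
    intro c hc
    exact passes_eq_look c (by
      have := (List.all_eq_true.mp hdom) c hc
      simpa using this)
  calc String.ofList (text.toList.map frakturLook) = String.ofList (fraktur_alt text).toList := by rw [this]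
    _ = fraktur_alt text := String.ofList_toList
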